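-- pv_equiv track=rewrite | github.com/yr0121/CSCI5481-Computational-Techniques-for-Genomics | hw4/hw4.py | cluster
-- ===== SOURCE A (Python) =====
-- def cluster(data, diff):
--     groups = [[data[0]]]
--     for x in data[1:]:
--         if abs(x - groups[-1][-1]) <= diff:
--             groups[-1].append(x)
--         else:
--             groups.append([x])
--     return groups
-- ===== SOURCE B (Python) =====
-- def cluster(data, diff):
--     # boundary-scan decomposition: record group start indices, emit groups as slices
--     start = 0
--     prev = data[0]  # seed of the first group (empty input raises IndexError, as in the original)
--     groups = []
--     for i in range(1, len(data)):
--         x = data[i]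
--         if abs(x - prev) > diff:
--             groups.append(data[start:i])
--             start = i
--         prev = x
--     groups.append(data[start:])
--     return groups
-- ===== Notes on version B (the rewrite author's own statement) =====
-- stated objective: alternative
-- what changed: A grows nested group lists element-by-element by appending to the last group; B scans once recording group-start boundaries and emits each group as a single slice of the input.
import Mathlib
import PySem

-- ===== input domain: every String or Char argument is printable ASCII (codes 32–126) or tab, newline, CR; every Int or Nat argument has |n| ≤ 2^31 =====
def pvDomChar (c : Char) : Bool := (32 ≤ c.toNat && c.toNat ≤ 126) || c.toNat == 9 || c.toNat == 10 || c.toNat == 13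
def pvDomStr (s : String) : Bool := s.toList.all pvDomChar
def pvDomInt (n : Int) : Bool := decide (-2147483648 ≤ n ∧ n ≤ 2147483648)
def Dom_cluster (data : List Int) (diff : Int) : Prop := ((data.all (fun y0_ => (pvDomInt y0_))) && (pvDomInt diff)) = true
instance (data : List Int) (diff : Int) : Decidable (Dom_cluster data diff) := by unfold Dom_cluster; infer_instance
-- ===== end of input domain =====

-- B builds groups as slices between recorded break boundaries instead of appending into nested lists (alternative decomposition).

-- ===== PORT A =====
-- A: groups = [[data[0]]]; for x in data[1:]: append to last group or start a new one.
def cluster (data : List Int) (diff : Int) : List (List Int) :=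
  match data with
  | [] => []    -- Python A raises IndexError on data[0]; excluded by Pre_cluster
  | d :: _ =>
    (PySem.List.slice data (some 1) none).foldl
      (fun groups x =>
        let lastGrp := PySem.List.pyGetD groups (-1) []
        if |x - PySem.List.pyGetD lastGrp (-1) 0| ≤ diff then
          groups.dropLast ++ [lastGrp ++ [x]]
        else groups ++ [[x]])
      [[d]]

-- ===== PORT B =====
-- B: one index scan; state (start, prev, groups); emit data[start:i] at each break, data[start:] at the end.
def cluster_alt (data : List Int) (diff : Int) : List (List Int) :=
  match data with
  | [] => []    -- Python B raises IndexError on data[0]; excluded by Pre_cluster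
  | d :: _ =>
    let st := (PySem.List.pyRange 1 (data.length : Int) 1).foldl
      (fun (s : Int × Int × List (List Int)) i =>
        let x := PySem.List.pyGetD data i 0
        if diff < |x - s.2.1| then
          (i, x, s.2.2 ++ [PySem.List.slice data (some s.1) (some i)])
        else (s.1, x, s.2.2))
      (0, d, [])
    st.2.2 ++ [PySem.List.slice data (some st.1) none]

-- ===== PRECONDITION & SPEC =====
-- Pre_ excludes only the empty list, on which both Pythons raise IndexError at data[0].
def Pre_cluster (data : List Int) (diff : Int) : Prop := data ≠ []
instance (data : List Int) (diff : Int) : Decidable (Pre_cluster data diff) := by unfold Pre_cluster; infer_instance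
def pvWitness_cluster : List Int × Int := ([1, 2, 9], 3)
def Spec_cluster (data : List Int) (diff : Int) (out : List (List Int)) : Prop := out = cluster_alt data diff
instance (data : List Int) (diff : Int) (out : List (List Int)) : Decidable (Spec_cluster data diff out) := by unfold Spec_cluster; infer_instance

-- ===== CLAIM (what is proved, stated in full; the proofs are below) =====
def Claim_equal_cluster : Prop := ∀ (data : List Int) (diff : Int), Dom_cluster data diff → Pre_cluster data diff → Spec_cluster data diff (cluster data diff)

-- ===== LEMMAS AND PROOFS =====

-- last element of the slice data[s:s+t] (as drop/take) is data[s+t-1]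
theorem pv_take_drop_last (data : List Int) (s t : Nat) (hst : s + t ≤ data.length) (ht : 0 < t) :
    PySem.List.pyGetD ((data.drop s).take t) (-1) 0 = data.getD (s + t - 1) 0 := by
  have hlen : ((data.drop s).take t).length = t := by
    simp only [List.length_take, List.length_drop]
    omega
  have hne : (data.drop s).take t ≠ [] := by
    intro h
    rw [h] at hlen
    simp at hlen
    omega
  rw [PySem.List.pyGetD_neg_one _ _ hne, List.getLast_eq_getElem]
  have h1 : s + t - 1 < data.length := by omega
  rw [List.getD_eq_getElem data 0 h1]
  simp only [List.getElem_take, List.getElem_drop, hlen]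
  congr 1
  omega

-- extending the slice data[s:s+t] by one element
theorem pv_take_snoc (data : List Int) (s t : Nat) (h : s + t < data.length) :
    (data.drop s).take (t + 1) = (data.drop s).take t ++ [data.getD (s + t) 0] := by
  rw [List.take_add_one]
  congr 1
  have hsome : (data.drop s)[t]? = some (data.getD (s + t) 0) := by
    rw [List.getElem?_drop, List.getElem?_eq_getElem (by omega), List.getD_eq_getElem data 0 (by omega)]
  rw [hsome]
  rfl

-- main invariant: A's fold over the remaining elements equals B's fold over the remaining indices
theorem cluster_main (data : List Int) (diff : Int) :
    ∀ (k : Nat) (i s prev : Int) (gs : List (List Int)),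
      data.length - i.toNat = k →
      1 ≤ i → i ≤ data.length → 0 ≤ s → s < i →
      prev = data.getD (i - 1).toNat 0 →
      (data.drop i.toNat).foldl
        (fun groups x =>
          let lastGrp := PySem.List.pyGetD groups (-1) []
          if |x - PySem.List.pyGetD lastGrp (-1) 0| ≤ diff then
            groups.dropLast ++ [lastGrp ++ [x]]
          else groups ++ [[x]])
        (gs ++ [(data.drop s.toNat).take (i.toNat - s.toNat)]) =
      (let st := (PySem.List.pyRange i (data.length : Int) 1).foldl
        (fun (t : Int × Int × List (List Int)) j =>
          let x := PySem.List.pyGetD data j 0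
          if diff < |x - t.2.1| then
            (j, x, t.2.2 ++ [PySem.List.slice data (some t.1) (some j)])
          else (t.1, x, t.2.2))
        (s, prev, gs)
       st.2.2 ++ [PySem.List.slice data (some st.1) none]) := by
  intro k
  induction k with
  | zero =>
    intro i s prev gs hk h1 h2 hs0 hsi hprev
    have hin : data.length ≤ i.toNat := by omega
    have hin' : (data.length : Int) ≤ i := by omega
    rw [List.drop_eq_nil_of_le hin, PySem.List.pyRange_one_eq_nil hin']
    simp only [List.foldl_nil]
    rw [PySem.List.slice_from _ hs0, List.take_of_length_le]
    simp only [List.length_drop]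
    omega
  | succ k IH =>
    intro i s prev gs hk h1 h2 hs0 hsi hprev
    have hlt : i.toNat < data.length := by omega
    have hilt : i < (data.length : Int) := by omega
    rw [List.drop_eq_getElem_cons hlt, PySem.List.pyRange_one_cons hilt,
        List.foldl_cons, List.foldl_cons]
    have hGlast : PySem.List.pyGetD ((data.drop s.toNat).take (i.toNat - s.toNat)) (-1) 0 = prev := by
      rw [pv_take_drop_last data s.toNat (i.toNat - s.toNat) (by omega) (by omega), hprev]
      congr 1
      omega
    have hx : PySem.List.pyGetD data i 0 = data[i.toNat] :=
      PySem.List.pyGetD_eq_getElem data 0 (by omega) hilt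
    have hi1 : (i + 1).toNat = i.toNat + 1 := by omega
    by_cases hc : |data[i.toNat] - prev| ≤ diff
    · -- same group: A appends to the last group, B keeps scanning
      simp only [PySem.List.pyGetD_neg_one_append_singleton, hGlast, hx, if_pos hc,
        if_neg (not_lt.mpr hc), List.dropLast_concat]
      have hsnoc : (data.drop s.toNat).take (i.toNat - s.toNat) ++ [data[i.toNat]] =
          (data.drop s.toNat).take (i.toNat + 1 - s.toNat) := by
        have hts : i.toNat + 1 - s.toNat = (i.toNat - s.toNat) + 1 := by omega
        rw [hts, pv_take_snoc data s.toNat (i.toNat - s.toNat) (by omega)]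
        have hidx : s.toNat + (i.toNat - s.toNat) = i.toNat := by omega
        rw [hidx, List.getD_eq_getElem data 0 hlt]
      rw [hsnoc]
      have h := IH (i + 1) s (data[i.toNat]) gs (by omega) (by omega) (by omega) hs0 (by omega)
        (by rw [show (i + 1 - 1).toNat = i.toNat from by omega, List.getD_eq_getElem data 0 hlt])
      simp only [hi1] at h
      exact h
    · -- break: A starts a new group, B emits the slice data[s:i] and restarts at i
      simp only [PySem.List.pyGetD_neg_one_append_singleton, hGlast, hx, if_neg hc,
        if_pos (not_le.mp hc)]
      rw [PySem.List.slice_toNat data hs0 (by omega)]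
      have hone : ([[data[i.toNat]]] : List (List Int)) =
          [(data.drop i.toNat).take (i.toNat + 1 - i.toNat)] := by
        rw [show i.toNat + 1 - i.toNat = 1 from by omega, List.drop_eq_getElem_cons hlt]
        rfl
      rw [hone]
      have h := IH (i + 1) i (data[i.toNat])
        (gs ++ [(data.drop s.toNat).take (i.toNat - s.toNat)])
        (by omega) (by omega) (by omega) (by omega) (by omega)
        (by rw [show (i + 1 - 1).toNat = i.toNat from by omega, List.getD_eq_getElem data 0 hlt])
      simp only [hi1] at h
      exact h

-- ===== VERDICT (by name: the statement is the Claim_ definition above) =====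
theorem cluster_spec : Claim_equal_cluster := by
  intro data diff _ hpre
  unfold Spec_cluster
  cases data with
  | nil => exact absurd rfl hpre
  | cons d rest =>
    show cluster (d :: rest) diff = cluster_alt (d :: rest) diff
    simp only [cluster, cluster_alt, PySem.List.slice_from_one, List.tail_cons]
    have h := cluster_main (d :: rest) diff rest.length 1 0 d [] rfl (by omega)
      (by push_cast [List.length_cons]; omega) (by omega) (by omega) rfl
    simp only [Int.toNat_one, Int.toNat_zero, List.drop_one, List.drop_zero, List.take_succ_cons,
      List.take_zero, List.nil_append, List.tail_cons] at h
    exact h
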